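-- pv_equiv track=rewrite | github.com/kowordidi/RhythmTap | src/main.py | closest_grid_line
-- ===== SOURCE A (Python) =====
-- def closest_grid_line(p, grid):
--     shortestDistance = 100
--     positionOfClosestGridLine = None
--     for g in range(len(grid)):
--
--         if distance(p, g) < shortestDistance:
--             shortestDistance = distance(p, g)
--             positionOfClosestGridLine = g
--
--     return positionOfClosestGridLine
--
-- def distance(p, g):
--     return abs(p - g)
-- ===== SOURCE B (Python) =====
-- def closest_grid_line(p, grid):
--     n = len(grid)
--     if n == 0:
--         return None
--     c = min(max(p, 0), n - 1)
--     return c if abs(p - c) < 100 else None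
-- ===== Notes on version B (the rewrite author's own statement) =====
-- stated objective: faster
-- what changed: Replaced the linear scan over all indices by a closed form: clamp p into [0, len(grid)-1] (the unique nearest index) and apply the distance-below-100 cutoff.
import Mathlib
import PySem

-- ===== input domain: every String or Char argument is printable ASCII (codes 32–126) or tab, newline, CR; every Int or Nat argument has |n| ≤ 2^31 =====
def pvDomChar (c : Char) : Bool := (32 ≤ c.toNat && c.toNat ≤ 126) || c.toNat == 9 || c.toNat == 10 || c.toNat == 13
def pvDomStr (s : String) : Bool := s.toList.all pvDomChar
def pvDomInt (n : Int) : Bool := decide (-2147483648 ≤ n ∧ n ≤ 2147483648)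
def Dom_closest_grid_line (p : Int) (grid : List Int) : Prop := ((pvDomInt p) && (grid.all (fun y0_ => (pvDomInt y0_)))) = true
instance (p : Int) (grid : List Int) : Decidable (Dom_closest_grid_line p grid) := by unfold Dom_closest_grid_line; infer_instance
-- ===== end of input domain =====

-- B replaces A's linear scan over the indices by an O(1) closed form (clamp p into
-- [0, len-1], then the distance-below-100 cutoff); return values are identical.

-- ===== PORT A =====
def pvDistance (p g : Int) : Int := |p - g|

def closest_grid_line (p : Int) (grid : List Int) : Option Int :=
  ((PySem.List.pyRange 0 (grid.length : Int) 1).foldl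
    (fun (st : Int × Option Int) g =>
      if pvDistance p g < st.1 then (pvDistance p g, some g) else st)
    ((100 : Int), (none : Option Int))).2

-- ===== PORT B =====
def closest_grid_line_alt (p : Int) (grid : List Int) : Option Int :=
  let n : Int := grid.length
  if n = 0 then none
  else
    let c := min (max p 0) (n - 1)
    if |p - c| < 100 then some c else none

-- ===== PRECONDITION & SPEC =====
def Spec_closest_grid_line (p : Int) (grid : List Int) (out : Option Int) : Prop := out = closest_grid_line_alt p grid
instance (p : Int) (grid : List Int) (out : Option Int) : Decidable (Spec_closest_grid_line p grid out) := by unfold Spec_closest_grid_line; infer_instance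

-- ===== CLAIM (what is proved, stated in full; the proofs are below) =====
def Claim_equal_closest_grid_line : Prop := ∀ (p : Int) (grid : List Int), Dom_closest_grid_line p grid → Spec_closest_grid_line p grid (closest_grid_line p grid)

-- ===== LEMMAS AND PROOFS =====

-- closed form of A's loop state after scanning indices 0..n-1
def pvState (p : Int) (n : Int) : Int × Option Int :=
  if n ≤ 0 then (100, none)
  else
    let c := min (max p 0) (n - 1)
    if |p - c| < 100 then (|p - c|, some c) else (100, none)

lemma pvFold_eq (p : Int) (n : Nat) :
    (PySem.List.pyRange 0 (n : Int) 1).foldl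
      (fun (st : Int × Option Int) g =>
        if pvDistance p g < st.1 then (pvDistance p g, some g) else st)
      ((100 : Int), (none : Option Int)) = pvState p n := by
  induction n with
  | zero => simp [PySem.List.pyRange_one_eq_nil, pvState]
  | succ m ih =>
    have h : ((m + 1 : Nat) : Int) = (m : Int) + 1 := by push_cast; ring
    rw [h, PySem.List.pyRange_one_succ_right (by positivity), List.foldl_append, ih]
    have hm : (0 : Int) ≤ (m : Int) := by positivity
    simp only [List.foldl_cons, List.foldl_nil, pvState, pvDistance, Int.abs_eq_natAbs]
    split_ifs <;>
      simp only [Prod.mk.injEq, Option.some.injEq] at * <;>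
      first
        | rfl
        | omega

-- ===== VERDICT (by name: the statement is the Claim_ definition above) =====
theorem closest_grid_line_spec : Claim_equal_closest_grid_line := by
  intro p grid _
  unfold Spec_closest_grid_line closest_grid_line closest_grid_line_alt
  rw [pvFold_eq p grid.length]
  have hlen : (0 : Int) ≤ (grid.length : Int) := by positivity
  simp only [pvState, Int.abs_eq_natAbs]
  split_ifs <;>
    first
      | rfl
      | omega
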